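-- pv_equiv track=rewrite | github.com/sashazh39-bit/cheketop2131 | scan_donors_cid.py | score_donor_for_sbp
-- ===== SOURCE A (Python) =====
-- SBP_PRIORITY_CHARS = set(
--     "АБВГДЕЖЗИЙКЛМНОПРСТУФХЦЧШЩЪЫЬЭЮЯабвгдежзийклмнопрстуфхцчшщъыьэюяё"
--     "0123456789"
--     " ₽.,:-"
-- )
--
-- def score_donor_for_sbp(entry: dict) -> int:
--     """Оценка донора для шаблона СБП: больше покрытие приоритетных символов — лучше."""
--     uni_to_cid = entry.get("uni_to_cid", {})
--     if not uni_to_cid: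
--         return 0
--     score = 0
--     for c in SBP_PRIORITY_CHARS:
--         cp = ord(c)
--         if str(cp) in uni_to_cid:
--             score += 1
--     return score
-- ===== SOURCE B (Python) =====
-- SBP_PRIORITY_CHARS = set(
--     "АБВГДЕЖЗИЙКЛМНОПРСТУФХЦЧШЩЪЫЬЭЮЯабвгдежзийклмнопрстуфхцчшщъыьэюяё"
--     "0123456789"
--     " ₽.,:-"
-- )
--
-- PRIORITY_CPS = {str(ord(c)) for c in SBP_PRIORITY_CHARS}
--
-- def score_donor_for_sbp(entry: dict) -> int:
--     """Оценка донора для шаблона СБП: больше покрытие приоритетных символов — лучше."""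
--     return sum(1 for k in entry.get("uni_to_cid", {}) if k in PRIORITY_CPS)
-- ===== Notes on version B (the rewrite author's own statement) =====
-- stated objective: idiomatic
-- what changed: B precomputes a module-level set of priority codepoint strings once and counts donor keys that belong to it in a single pass over uni_to_cid, instead of A's loop over the fixed priority set probing the dict per character; the empty-map guard falls out naturally.
import Mathlib
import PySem

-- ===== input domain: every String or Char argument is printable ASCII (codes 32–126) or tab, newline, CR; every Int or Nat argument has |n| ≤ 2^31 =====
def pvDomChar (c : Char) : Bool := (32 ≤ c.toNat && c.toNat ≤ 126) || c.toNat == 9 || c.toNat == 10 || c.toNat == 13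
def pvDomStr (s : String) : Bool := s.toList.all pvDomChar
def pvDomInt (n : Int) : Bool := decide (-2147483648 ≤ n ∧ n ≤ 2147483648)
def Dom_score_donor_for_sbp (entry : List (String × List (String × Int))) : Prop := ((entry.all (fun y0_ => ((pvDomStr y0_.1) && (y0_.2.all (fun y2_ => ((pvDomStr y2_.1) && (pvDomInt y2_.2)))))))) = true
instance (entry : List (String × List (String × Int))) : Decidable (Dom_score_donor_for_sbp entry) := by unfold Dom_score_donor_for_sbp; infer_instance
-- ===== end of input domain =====

-- B iterates over the donor's uni_to_cid keys testing membership in a precomputed set of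
-- priority codepoint strings, instead of A's loop over the priority characters probing the dict.

-- ===== PORT A =====
-- SBP_PRIORITY_CHARS as a Python set of chars (all 81 chars of the literal are distinct)
def sbpPriorityChars : PySem.Set Char :=
  PySem.Set.ofList ("АБВГДЕЖЗИЙКЛМНОПРСТУФХЦЧШЩЪЫЬЭЮЯабвгдежзийклмнопрстуфхцчшщъыьэюяё0123456789 ₽.,:-".toList)

def score_donor_for_sbp (entry : List (String × List (String × Int))) : Int :=
  let uni_to_cid := (PySem.Dict.mk entry).getD "uni_to_cid" []
  if uni_to_cid = [] then 0
  else
    -- for c in SBP_PRIORITY_CHARS: if str(ord(c)) in uni_to_cid: score += 1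
    -- (summing 0/1 over a set is order-independent, so iterating the Set's list is exact)
    sbpPriorityChars.foldl
      (fun score c =>
        if (PySem.Dict.mk uni_to_cid).contains (PySem.Int.toStr (c.toNat : Int)) then score + 1
        else score) (0 : Int)

-- ===== PORT B =====
-- PRIORITY_CPS = {str(ord(c)) for c in SBP_PRIORITY_CHARS}
def sbpPriorityCps : PySem.Set String :=
  PySem.Set.ofList (sbpPriorityChars.map (fun c => PySem.Int.toStr (c.toNat : Int)))

def score_donor_for_sbp_alt (entry : List (String × List (String × Int))) : Int :=
  -- sum(1 for k in entry.get("uni_to_cid", {}) if k in PRIORITY_CPS)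
  ((PySem.Dict.mk entry).getD "uni_to_cid" []).foldl
    (fun acc kv => if PySem.Set.contains sbpPriorityCps kv.1 then acc + 1 else acc) (0 : Int)

-- ===== PRECONDITION & SPEC =====
-- Pre_ is the Python dict invariant: the keys of uni_to_cid are distinct. Every input the Python
-- function accepts satisfies it (a Python dict cannot carry duplicate keys); it excludes nothing A returns on.
def Pre_score_donor_for_sbp (entry : List (String × List (String × Int))) : Prop :=
  (((PySem.Dict.mk entry).getD "uni_to_cid" []).map Prod.fst).Nodup
instance (entry : List (String × List (String × Int))) : Decidable (Pre_score_donor_for_sbp entry) := by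
  unfold Pre_score_donor_for_sbp; infer_instance

def pvWitness_score_donor_for_sbp : (List (String × List (String × Int))) :=
  [("uni_to_cid", [("1072", 5), ("32", 0), ("x", 1)])]

def Spec_score_donor_for_sbp (entry : List (String × List (String × Int))) (out : Int) : Prop := out = score_donor_for_sbp_alt entry
instance (entry : List (String × List (String × Int))) (out : Int) : Decidable (Spec_score_donor_for_sbp entry out) := by unfold Spec_score_donor_for_sbp; infer_instance

-- ===== CLAIM (what is proved, stated in full; the proofs are below) =====
def Claim_equal_score_donor_for_sbp : Prop := ∀ (entry : List (String × List (String × Int))), Dom_score_donor_for_sbp entry → Pre_score_donor_for_sbp entry → Spec_score_donor_for_sbp entry (score_donor_for_sbp entry)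


-- ===== LEMMAS AND PROOFS =====

-- counting common elements of two duplicate-free lists does not depend on which list is scanned
lemma countP_mem_comm {a : Type} [DecidableEq a] (P K : List a)
    (hP : P.Nodup) (hK : K.Nodup) :
    P.countP (fun p => decide (p ∈ K)) = K.countP (fun k => decide (k ∈ P)) := by
  rw [List.countP_eq_length_filter, List.countP_eq_length_filter,
      ← List.toFinset_card_of_nodup (hP.filter _), ← List.toFinset_card_of_nodup (hK.filter _)]
  congr 1
  ext x
  simp only [List.toFinset_filter, Finset.mem_filter, List.mem_toFinset, decide_eq_true_eq]
  tauto

lemma countP_map_comm {a b : Type} [DecidableEq b] (P : List a) (f : a → b) (K : List b)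
    (hPf : (P.map f).Nodup) (hK : K.Nodup) :
    P.countP (fun c => decide (f c ∈ K)) = K.countP (fun k => decide (k ∈ P.map f)) := by
  rw [← countP_mem_comm (P.map f) K hPf hK, List.countP_map]
  rfl

lemma countP_fst_mem {a b : Type} [DecidableEq a] (D : List (a × b)) (Q : List a) :
    D.countP (fun kv => decide (kv.1 ∈ Q)) = (D.map Prod.fst).countP (fun k => decide (k ∈ Q)) := by
  rw [List.countP_map]
  rfl

set_option maxRecDepth 16384 in
lemma cps_nodup :
    (sbpPriorityChars.map (fun c => PySem.Int.toStr (c.toNat : Int))).Nodup := by decide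

-- ===== VERDICT (by name: the statement is the Claim_ definition above) =====
set_option maxRecDepth 16384 in
theorem score_donor_for_sbp_spec : Claim_equal_score_donor_for_sbp := by
  intro entry _ hpre
  unfold Pre_score_donor_for_sbp at hpre
  simp only [Spec_score_donor_for_sbp, score_donor_for_sbp, score_donor_for_sbp_alt]
  by_cases h : (PySem.Dict.mk entry).getD "uni_to_cid" [] = []
  · rw [if_pos h, h]; rfl
  · rw [if_neg h, PySem.List.foldl_if_add_one, PySem.List.foldl_if_add_one, zero_add, zero_add]
    norm_cast
    have hA : ∀ c ∈ sbpPriorityChars,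
        ((PySem.Dict.mk ((PySem.Dict.mk entry).getD "uni_to_cid" [])).contains
          (PySem.Int.toStr (c.toNat : Int)))
        = true ↔ decide ((PySem.Int.toStr (c.toNat : Int)) ∈
            ((PySem.Dict.mk entry).getD "uni_to_cid" []).map Prod.fst) = true := by
      intro c _
      rw [decide_eq_true_eq, PySem.Dict.contains_iff_mem_keys]
      simp [PySem.Dict.keys]
    have hB : ∀ kv ∈ (PySem.Dict.mk entry).getD "uni_to_cid" [],
        PySem.Set.contains sbpPriorityCps kv.1 = true ↔ decide (kv.1 ∈ sbpPriorityCps) = true := by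
      intro kv _
      rw [decide_eq_true_eq]
      simp [PySem.Set.contains]
    rw [List.countP_congr hA, List.countP_congr hB]
    rw [countP_fst_mem]
    have hQ : sbpPriorityCps = sbpPriorityChars.map (fun c => PySem.Int.toStr (c.toNat : Int)) := by
      unfold sbpPriorityCps
      exact PySem.Set.ofList_eq_self_of_nodup _ cps_nodup
    rw [hQ]
    exact countP_map_comm _ _ _ cps_nodup hpre
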